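-- pv_equiv track=rewrite | github.com/manwar/perlweeklychallenge-club | challenge-261/roger-bell-west/python/ch-1.py | elementdigitsum
-- ===== SOURCE A (Python) =====
-- def elementdigitsum(a):
--   delta = 0
--   for n0 in a:
--     n = n0 // 10
--     m = 10
--     while n > 0:
--       delta += (n % 10) * (m - 1)
--       n //= 10
--       m *= 10
--   return delta
-- ===== SOURCE B (Python) =====
-- def elementdigitsum(a):
--   def digitsum(n):
--     return 0 if n <= 0 else n % 10 + digitsum(n // 10)
--   pos = [n for n in a if n > 0]
--   return sum(pos) - sum(digitsum(n) for n in pos)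
-- ===== Notes on version B (the rewrite author's own statement) =====
-- stated objective: simpler
-- what changed: Replaces A's single fold with a per-element positional-weight loop (multiplier m growing 10x per digit over n0//10) by filtering the positive elements once and returning sum(pos) minus the sum of their digit sums (computed by a plain recursion), using the identity that each element contributes n - digitsum(n).
import Mathlib
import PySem

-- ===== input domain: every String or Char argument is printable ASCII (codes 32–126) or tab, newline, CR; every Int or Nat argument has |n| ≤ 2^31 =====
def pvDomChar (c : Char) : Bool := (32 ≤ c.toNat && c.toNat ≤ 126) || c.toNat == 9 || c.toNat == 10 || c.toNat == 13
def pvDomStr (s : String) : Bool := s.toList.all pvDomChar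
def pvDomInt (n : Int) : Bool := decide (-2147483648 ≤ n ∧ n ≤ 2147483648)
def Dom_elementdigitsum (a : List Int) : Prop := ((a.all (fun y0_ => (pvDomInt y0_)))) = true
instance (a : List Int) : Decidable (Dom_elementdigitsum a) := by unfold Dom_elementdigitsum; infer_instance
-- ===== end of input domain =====

-- B filters the positive elements once and returns sum(pos) - sum(digitsum(n) for n in pos), by the identity that each element contributes n - digitsum(n); objective: simpler.
-- ===== PORT A =====
-- inner 'while n > 0' loop of A, carrying (n, m, delta)
def elementdigitsumLoop (n m delta : Int) : Int :=
  if 0 < n then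
    elementdigitsumLoop (PySem.Int.floordiv n 10) (m * 10) (delta + (PySem.Int.mod n 10) * (m - 1))
  else delta
termination_by n.toNat
decreasing_by
  rw [PySem.Int.floordiv_eq_ediv_of_pos (by omega : (0:Int) < 10)]
  omega

def elementdigitsum (a : List Int) : Int :=
  a.foldl (fun delta n0 => elementdigitsumLoop (PySem.Int.floordiv n0 10) 10 delta) 0

-- ===== PORT B =====
-- B's plain (non-accumulating) recursive digit sum
def digitsumRec (n : Int) : Int :=
  if n ≤ 0 then 0 else PySem.Int.mod n 10 + digitsumRec (PySem.Int.floordiv n 10)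
termination_by n.toNat
decreasing_by
  rw [PySem.Int.floordiv_eq_ediv_of_pos (by omega : (0:Int) < 10)]
  omega

def elementdigitsum_alt (a : List Int) : Int :=
  let pos := a.filter (fun n => 0 < n)
  pos.sum - (pos.map digitsumRec).sum

-- ===== PRECONDITION & SPEC =====
def Spec_elementdigitsum (a : List Int) (out : Int) : Prop := out = elementdigitsum_alt a
instance (a : List Int) (out : Int) : Decidable (Spec_elementdigitsum a out) := by unfold Spec_elementdigitsum; infer_instance

-- ===== CLAIM (what is proved, stated in full; the proofs are below) =====
def Claim_equal_elementdigitsum : Prop := ∀ (a : List Int), Dom_elementdigitsum a → Spec_elementdigitsum a (elementdigitsum a)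

-- ===== LEMMAS AND PROOFS =====

-- invariant of A's inner loop: running value = delta + m*n - digitsumRec(n), for n ≥ 0
theorem loop_inv (k : Nat) : ∀ n m delta : Int, n.toNat = k → 0 ≤ n →
    elementdigitsumLoop n m delta = delta + m * n - digitsumRec n := by
  induction k using Nat.strong_induction_on with
  | _ k ih =>
    intro n m delta hk hn
    by_cases h : 0 < n
    · have h10 : (0:Int) < 10 := by omega
      have hd := PySem.Int.floordiv_eq_ediv_of_pos h10 (a := n)
      have hm := PySem.Int.mod_eq_emod_of_pos h10 (a := n)
      have hlt : (PySem.Int.floordiv n 10).toNat < k := by rw [hd]; omega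
      have hpos : 0 ≤ PySem.Int.floordiv n 10 := by rw [hd]; omega
      have hid : 10 * PySem.Int.floordiv n 10 + PySem.Int.mod n 10 = n := by rw [hd, hm]; omega
      conv_lhs => rw [elementdigitsumLoop]
      conv_rhs => rw [digitsumRec]
      simp only [if_pos h, if_neg (by omega : ¬ n ≤ 0)]
      rw [ih _ hlt _ _ _ rfl hpos]
      linear_combination m * hid
    · conv_lhs => rw [elementdigitsumLoop]
      conv_rhs => rw [digitsumRec]
      have : n = 0 := by omega
      simp [this]

-- per-element step of A's fold, expressed via digitsumRec
theorem step_eq (delta n0 : Int) :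
    elementdigitsumLoop (PySem.Int.floordiv n0 10) 10 delta =
      (if 0 < n0 then delta + (n0 - digitsumRec n0) else delta) := by
  have h10 : (0:Int) < 10 := by omega
  have hd := PySem.Int.floordiv_eq_ediv_of_pos h10 (a := n0)
  have hm := PySem.Int.mod_eq_emod_of_pos h10 (a := n0)
  by_cases h : 0 < n0
  · have hpos : 0 ≤ PySem.Int.floordiv n0 10 := by rw [hd]; omega
    have hid : 10 * PySem.Int.floordiv n0 10 + PySem.Int.mod n0 10 = n0 := by rw [hd, hm]; omega
    rw [loop_inv (PySem.Int.floordiv n0 10).toNat _ _ _ rfl hpos, if_pos h]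
    conv_rhs => rw [digitsumRec]
    rw [if_neg (by omega : ¬ n0 ≤ 0)]
    linear_combination hid
  · have hle : PySem.Int.floordiv n0 10 ≤ 0 := by rw [hd]; omega
    rw [elementdigitsumLoop, if_neg (by omega), if_neg h]

-- A's fold over the whole list equals sum(pos) - sum of digit sums of pos, shifted by the accumulator
theorem fold_eq (a : List Int) : ∀ delta : Int,
    a.foldl (fun delta n0 => elementdigitsumLoop (PySem.Int.floordiv n0 10) 10 delta) delta =
      delta + (a.filter (fun n => 0 < n)).sum
        - ((a.filter (fun n => 0 < n)).map digitsumRec).sum := by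
  induction a with
  | nil => intro delta; simp
  | cons x xs ih =>
    intro delta
    simp only [List.foldl_cons, List.filter_cons]
    rw [step_eq]
    by_cases h : 0 < x
    · rw [if_pos h, ih]
      simp only [decide_eq_true_eq, if_pos h, List.sum_cons, List.map_cons, List.sum_cons]
      ring
    · rw [if_neg h, ih]
      simp [h]

-- ===== VERDICT =====
theorem elementdigitsum_spec : Claim_equal_elementdigitsum := by
  intro a _
  unfold Spec_elementdigitsum elementdigitsum elementdigitsum_alt
  simp only [fold_eq a 0]
  ring
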